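-- pv_equiv track=rewrite | github.com/ibrahimasry/problem-solving | 2449-minimum-number-of-operations-to-make-arrays-similar/2449-minimum-number-of-operations-to-make-arrays-similar.py | makeSimilar
-- ===== SOURCE A (Python) =====
-- from typing import List
--
-- def makeSimilar(nums: List[int], target: List[int]) -> int:
--     odds1 = sorted([n for n in nums if n %2])
--     odds2 = sorted([n for n in target if n %2])
--
--     evens1 = sorted([n for n in nums if n % 2 == 0])
--     evens2 = sorted([n for n in target if n % 2 == 0])
--
--     def makeEqual(arr1,arr2):
--         res = 0
--         for c1,c2 in zip(arr1,arr2):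
--             res += abs(c1-c2) // 2
--         return res
--
--     return makeEqual(odds1,odds2) + makeEqual(evens1,evens2) >> 1
-- ===== SOURCE B (Python) =====
-- from typing import List
--
-- def makeSimilar(nums: List[int], target: List[int]) -> int:
--     # selection-based greedy matching: no sorting at all; repeatedly extract the
--     # minimum of each same-parity pool, pair them, and sum the raw gaps; one //4.
--     def pairSum(a, b):
--         total = 0
--         while a and b:
--             x = min(a)
--             y = min(b)
--             a.remove(x)
--             b.remove(y)
--             total += abs(x - y)
--         return total
--
--     odd = pairSum([n for n in nums if n % 2], [n for n in target if n % 2])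
--     even = pairSum([n for n in nums if n % 2 == 0], [n for n in target if n % 2 == 0])
--     return (odd + even) // 4
-- ===== Notes on version B (the rewrite author's own statement) =====
-- stated objective: alternative
-- what changed: B removes sorting entirely: instead of A's four sorts plus zipped per-pair halved sums, B repeatedly extracts the minimum of each same-parity pool (selection-based greedy matching), sums the raw absolute gaps, and divides once by 4.
import Mathlib
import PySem

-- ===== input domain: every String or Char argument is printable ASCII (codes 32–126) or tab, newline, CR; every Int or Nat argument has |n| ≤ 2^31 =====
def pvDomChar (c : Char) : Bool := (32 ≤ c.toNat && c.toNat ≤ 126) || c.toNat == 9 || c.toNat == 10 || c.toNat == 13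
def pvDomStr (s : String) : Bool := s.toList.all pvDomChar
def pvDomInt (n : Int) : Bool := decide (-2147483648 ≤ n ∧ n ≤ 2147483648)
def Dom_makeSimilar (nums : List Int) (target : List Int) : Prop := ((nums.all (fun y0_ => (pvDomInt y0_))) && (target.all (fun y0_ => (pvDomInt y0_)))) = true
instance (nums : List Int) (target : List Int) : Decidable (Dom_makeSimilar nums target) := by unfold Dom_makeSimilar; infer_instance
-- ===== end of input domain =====

-- B replaces A's sort-then-zip pairing by selection-based greedy matching: it repeatedly
-- extracts the minimum of each same-parity pool, sums the raw absolute gaps, and divides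
-- once by 4 (objective: alternative algorithm, no sorting; not faster).

-- ===== PORT A =====
def pvMakeEqual (arr1 arr2 : List Int) : Int :=
  (arr1.zip arr2).foldl (fun res p => res + PySem.Int.floordiv |p.1 - p.2| 2) 0

def makeSimilar (nums : List Int) (target : List Int) : Int :=
  let odds1 := PySem.List.sorted (nums.filter (fun n => PySem.Int.mod n 2 != 0)) (fun x => x) false
  let odds2 := PySem.List.sorted (target.filter (fun n => PySem.Int.mod n 2 != 0)) (fun x => x) false
  let evens1 := PySem.List.sorted (nums.filter (fun n => PySem.Int.mod n 2 == 0)) (fun x => x) false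
  let evens2 := PySem.List.sorted (target.filter (fun n => PySem.Int.mod n 2 == 0)) (fun x => x) false
  (pvMakeEqual odds1 odds2 + pvMakeEqual evens1 evens2) >>> (1 : Nat)

-- ===== PORT B =====
-- Source B's while-loop, with fuel = length of the first pool (a pure totality guard:
-- the loop removes one element of `a` per iteration, so the fuel never runs out first).
-- Python list.remove of the min value = List.erase, exact since the min is a member.
def pvPairSumGo : Nat → List Int → List Int → Int
  | 0, _, _ => 0
  | Nat.succ n, a, b =>
    match PySem.List.min? a (fun v => v), PySem.List.min? b (fun v => v) with
    | some x, some y => |x - y| + pvPairSumGo n (a.erase x) (b.erase y)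
    | _, _ => 0

def pvPairSum (a b : List Int) : Int := pvPairSumGo a.length a b

def makeSimilar_alt (nums : List Int) (target : List Int) : Int :=
  let odd := pvPairSum (nums.filter (fun n => PySem.Int.mod n 2 != 0))
                       (target.filter (fun n => PySem.Int.mod n 2 != 0))
  let even := pvPairSum (nums.filter (fun n => PySem.Int.mod n 2 == 0))
                        (target.filter (fun n => PySem.Int.mod n 2 == 0))
  PySem.Int.floordiv (odd + even) 4

-- ===== PRECONDITION & SPEC =====
def Spec_makeSimilar (nums : List Int) (target : List Int) (out : Int) : Prop := out = makeSimilar_alt nums target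
instance (nums : List Int) (target : List Int) (out : Int) : Decidable (Spec_makeSimilar nums target out) := by unfold Spec_makeSimilar; infer_instance

-- ===== CLAIM (what is proved, stated in full; the proofs are below) =====
def Claim_equal_makeSimilar : Prop := ∀ (nums : List Int) (target : List Int), Dom_makeSimilar nums target → Spec_makeSimilar nums target (makeSimilar nums target)

-- ===== LEMMAS AND PROOFS =====

-- the raw gap sum over the sorted zip
def pvZipAbs (a b : List Int) : Int :=
  ((a.zip b).map (fun p => |p.1 - p.2|)).sum

-- a sorted list is its minimum followed by the sorted rest
theorem pvSorted_cons_min (a : List Int) (x : Int)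
    (hx : PySem.List.min? a (fun v => v) = some x) :
    PySem.List.sorted a (fun v => v) false =
      x :: PySem.List.sorted (a.erase x) (fun v => v) false := by
  apply PySem.List.sorted_id_eq_of_perm_of_pairwise
  · exact ((PySem.List.sorted_perm _ _ _).cons x).trans
      (List.perm_cons_erase (PySem.List.min?_mem hx)).symm
  · constructor
    · intro y hy
      exact PySem.List.min?_isMin hx y
        (List.mem_of_mem_erase ((PySem.List.mem_sorted _ _ _ _).1 hy))
    · exact PySem.List.sorted_pairwise _ _

theorem pvSorted_nil : PySem.List.sorted ([] : List Int) (fun v => v) false = [] := rfl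

-- selection-based pairing computes the sorted-zip gap sum
theorem pvPairSumGo_eq_zipAbs (n : Nat) : ∀ (a b : List Int), a.length ≤ n →
    pvPairSumGo n a b =
      pvZipAbs (PySem.List.sorted a (fun v => v) false)
               (PySem.List.sorted b (fun v => v) false) := by
  induction n with
  | zero =>
    intro a b hn
    have : a = [] := List.eq_nil_of_length_eq_zero (Nat.le_zero.1 hn)
    subst this
    simp [pvPairSumGo, pvZipAbs, pvSorted_nil]
  | succ n ih =>
    intro a b hn
    rw [pvPairSumGo]
    cases ha : PySem.List.min? a (fun v => v) with
    | none =>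
      have : a = [] := (PySem.List.min?_eq_none_iff _ _).1 ha
      subst this
      simp [pvZipAbs, pvSorted_nil]
    | some x =>
      cases hb : PySem.List.min? b (fun v => v) with
      | none =>
        have : b = [] := (PySem.List.min?_eq_none_iff _ _).1 hb
        subst this
        simp [pvZipAbs, pvSorted_nil]
      | some y =>
        rw [pvSorted_cons_min a x ha, pvSorted_cons_min b y hb]
        simp only [pvZipAbs, List.zip_cons_cons, List.map_cons, List.sum_cons]
        have hx := PySem.List.min?_mem ha
        have h1 := List.length_erase_of_mem hx
        have h2 := List.length_pos_of_mem hx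
        rw [ih (a.erase x) (b.erase y) (by omega)]
        rfl

theorem pvPairSum_eq_zipAbs (a b : List Int) :
    pvPairSum a b =
      pvZipAbs (PySem.List.sorted a (fun v => v) false)
               (PySem.List.sorted b (fun v => v) false) :=
  pvPairSumGo_eq_zipAbs a.length a b (le_refl _)

-- within one parity class each gap is even and A's halved sum is half the raw sum
theorem pvMakeEqual_half (r : Int) (a b : List Int)
    (ha : ∀ z ∈ a, PySem.Int.mod z 2 = r) (hb : ∀ z ∈ b, PySem.Int.mod z 2 = r) :
    pvZipAbs a b = 2 * pvMakeEqual a b := by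
  unfold pvZipAbs pvMakeEqual
  rw [PySem.List.foldl_add]
  simp only [zero_add]
  have hmap : (a.zip b).map (fun p => |p.1 - p.2|) =
      (a.zip b).map (fun p => 2 * PySem.Int.floordiv |p.1 - p.2| 2) := by
    apply List.map_congr_left
    intro p hp
    obtain ⟨p1, p2⟩ := p
    have hm := List.of_mem_zip hp
    have h1 := ha p1 hm.1
    have h2 := hb p2 hm.2
    have hdvd : (2:Int) ∣ |p1 - p2| := by
      rw [dvd_abs]
      have e1 := PySem.Int.floordiv_mul_add_mod p1 2
      have e2 := PySem.Int.floordiv_mul_add_mod p2 2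
      exact ⟨PySem.Int.floordiv p1 2 - PySem.Int.floordiv p2 2, by
        rw [h1] at e1; rw [h2] at e2; linarith⟩
    rw [PySem.Int.floordiv_eq_ediv_of_pos (by norm_num)]
    obtain ⟨k, hk⟩ := hdvd
    rw [hk]
    omega
  rw [hmap, List.sum_map_mul_left]

theorem pvMemEv (xs : List Int) (y : Int)
    (hy : y ∈ PySem.List.sorted (xs.filter (fun n => PySem.Int.mod n 2 == 0)) (fun x => x) false) :
    PySem.Int.mod y 2 = 0 := by
  rw [PySem.List.mem_sorted, List.mem_filter] at hy
  exact beq_iff_eq.1 hy.2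

theorem pvMemOd (xs : List Int) (y : Int)
    (hy : y ∈ PySem.List.sorted (xs.filter (fun n => PySem.Int.mod n 2 != 0)) (fun x => x) false) :
    PySem.Int.mod y 2 = 1 := by
  rw [PySem.List.mem_sorted, List.mem_filter] at hy
  rcases PySem.Int.mod_two_eq y with h | h
  · exact absurd h (by simpa using hy.2)
  · exact h

-- ===== VERDICT (by name: the statement is the Claim_ definition above) =====
theorem makeSimilar_spec : Claim_equal_makeSimilar := by
  intro nums target _
  unfold Spec_makeSimilar makeSimilar makeSimilar_alt
  dsimp only
  rw [pvPairSum_eq_zipAbs, pvPairSum_eq_zipAbs]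
  rw [pvMakeEqual_half 1 _ _ (pvMemOd nums) (pvMemOd target),
      pvMakeEqual_half 0 _ _ (pvMemEv nums) (pvMemEv target)]
  rw [Int.shiftRight_eq_div_pow, PySem.Int.floordiv_eq_ediv_of_pos (by norm_num)]
  omega
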